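-- pv_equiv track=rewrite | github.com/challenging/hearts-game | simple_game.py | winning_index
-- ===== SOURCE A (Python) =====
-- def winning_index(trick):
--     leading_suit, leading_rank = trick[1][0]
--
--     winning_index = 0
--     winning_card = trick[1][0]
--     for i, (suit, rank) in enumerate(trick[1][1:]):
--         if suit == leading_suit and rank > leading_rank:
--             winning_index = i+1
--             winning_card = [suit, rank]
--
--             leading_rank = rank
--
--     return winning_index, winning_card
-- ===== SOURCE B (Python) =====
-- def winning_index(trick):
--     cards = trick[1]
--     leading_suit = cards[0][0]
--     candidates = [(i, (s, r)) for i, (s, r) in enumerate(cards) if s == leading_suit]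
--     i, (s, r) = max(candidates, key=lambda ic: ic[1][1])
--     return i, [s, r]
-- ===== Notes on version B (the rewrite author's own statement) =====
-- stated objective: simpler
-- what changed: Replaces A's fused filter-and-running-max loop with mutable winner state by a two-phase decomposition: a filter comprehension collecting (index, card) pairs of the leading suit, then a single max reduction keyed by rank (Python's max keeps the first maximal element, matching A's strict '>' tie-break).
import Mathlib
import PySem

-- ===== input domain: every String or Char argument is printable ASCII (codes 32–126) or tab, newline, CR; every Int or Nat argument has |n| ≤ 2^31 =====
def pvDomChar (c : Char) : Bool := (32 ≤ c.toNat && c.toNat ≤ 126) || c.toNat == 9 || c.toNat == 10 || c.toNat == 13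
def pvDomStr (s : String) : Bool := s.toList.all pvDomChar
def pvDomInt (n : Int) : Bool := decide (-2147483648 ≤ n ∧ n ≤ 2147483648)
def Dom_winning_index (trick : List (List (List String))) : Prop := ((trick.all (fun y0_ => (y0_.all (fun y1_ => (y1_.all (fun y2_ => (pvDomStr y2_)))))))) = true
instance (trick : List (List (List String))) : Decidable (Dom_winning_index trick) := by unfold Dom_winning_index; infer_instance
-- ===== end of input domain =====

-- B replaces A's fused filter-and-running-max loop by a filter pass followed by a
-- first-maximum reduction keyed on the rank; return value only, no side effects.

-- ===== PORT A =====
-- the loop body of A: on (suit, rank)-shaped cards, update winner if leading suit and strictly higher rank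
def pvStepA (ls : String) (st : Int × List String × String) (p : Int × List String) : Int × List String × String :=
  match p.2 with
  | [suit, rank] => if suit = ls ∧ st.2.2 < rank then (p.1 + 1, [suit, rank], rank) else st
  | _ => st

def winning_index (trick : List (List (List String))) : Int × List String :=
  match (PySem.List.pyGet? trick 1).getD [] with
  | [] => (0, [])
  | c0 :: rest =>
    match c0 with
    | [ls, lr] =>
      let st := (PySem.List.enumerate rest).foldl (pvStepA ls) ((0 : Int), c0, lr)
      (st.1, st.2.1)
    | _ => (0, [])

-- ===== PORT B =====
-- the comprehension's body: keep (i, (s, r)) when the card is [s, r] with s the leading suit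
def pvCandB (ls : String) (p : Int × List String) : Option (Int × String × String) :=
  match p.2 with
  | [s, r] => if s = ls then some (p.1, s, r) else none
  | _ => none

def winning_index_alt (trick : List (List (List String))) : Int × List String :=
  let cards := (PySem.List.pyGet? trick 1).getD []
  let ls := ((PySem.List.pyGet? ((PySem.List.pyGet? cards 0).getD []) 0)).getD ""
  let candidates := (PySem.List.enumerate cards).filterMap (pvCandB ls)
  match PySem.List.max? candidates (fun ic => ic.2.2) with
  | some (i, s, r) => (i, [s, r])
  | none => (0, [])

-- ===== PRECONDITION & SPEC =====
-- Pre_ is exactly A's domain: trick[1] must exist and be a nonempty list of 2-element cards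
-- (otherwise A raises IndexError or a ValueError on unpacking; B raises there too).
def Pre_winning_index (trick : List (List (List String))) : Prop :=
  2 ≤ trick.length ∧ trick.getD 1 [] ≠ [] ∧ ∀ c ∈ trick.getD 1 [], c.length = 2
instance (trick : List (List (List String))) : Decidable (Pre_winning_index trick) := by
  unfold Pre_winning_index; infer_instance
def pvWitness_winning_index : List (List (List String)) := [[], [["h", "2"], ["h", "5"]]]

def Spec_winning_index (trick : List (List (List String))) (out : Int × List String) : Prop := out = winning_index_alt trick
instance (trick : List (List (List String))) (out : Int × List String) : Decidable (Spec_winning_index trick out) := by unfold Spec_winning_index; infer_instance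

-- ===== CLAIM (what is proved, stated in full; the proofs are below) =====
def Claim_equal_winning_index : Prop := ∀ (trick : List (List (List String))), Dom_winning_index trick → Pre_winning_index trick → Spec_winning_index trick (winning_index trick)

-- ===== LEMMAS AND PROOFS =====
-- the fold step hidden inside PySem.List.max? with key (fun ic => ic.2.2)
def pvMStep (acc : Option (Int × String × String)) (x : Int × String × String) : Option (Int × String × String) :=
  match acc with
  | none => some x
  | some m => if m.2.2 < x.2.2 then some x else some m

lemma max?_eq_foldl_pvMStep (xs : List (Int × String × String)) :
    PySem.List.max? xs (fun ic => ic.2.2) = xs.foldl pvMStep none := by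
  unfold PySem.List.max?
  congr 1
  funext acc x
  cases acc <;> rfl

lemma main_inv (ls : String) (l : List (List String)) :
    ∀ (a i : Int) (s r : String), ∃ (j : Int) (s' r' : String),
      ((PySem.List.enumerate l (a + 1)).filterMap (pvCandB ls)).foldl pvMStep (some (i, s, r)) =
          some (j, s', r') ∧
        (PySem.List.enumerate l a).foldl (pvStepA ls) (i, [s, r], r) = (j, [s', r'], r') := by
  induction l with
  | nil =>
    intro a i s r
    exact ⟨i, s, r, by simp [PySem.List.enumerate_nil], by simp [PySem.List.enumerate_nil]⟩
  | cons c t ih =>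
    intro a i s r
    rw [PySem.List.enumerate_cons, PySem.List.enumerate_cons]
    match c with
    | [] =>
      obtain ⟨j, s', r', h1, h2⟩ := ih (a + 1) i s r
      exact ⟨j, s', r', by simpa [pvCandB] using h1, by simpa [pvStepA] using h2⟩
    | [suit] =>
      obtain ⟨j, s', r', h1, h2⟩ := ih (a + 1) i s r
      exact ⟨j, s', r', by simpa [pvCandB] using h1, by simpa [pvStepA] using h2⟩
    | suit :: rank :: x :: tl =>
      obtain ⟨j, s', r', h1, h2⟩ := ih (a + 1) i s r
      exact ⟨j, s', r', by simpa [pvCandB] using h1, by simpa [pvStepA] using h2⟩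
    | [suit, rank] =>
      by_cases hs : suit = ls
      · by_cases hr : r < rank
        · obtain ⟨j, s', r', h1, h2⟩ := ih (a + 1) (a + 1) suit rank
          exact ⟨j, s', r', by simpa [pvCandB, hs, hr, pvMStep] using h1,
            by simpa [pvStepA, hs, hr] using h2⟩
        · obtain ⟨j, s', r', h1, h2⟩ := ih (a + 1) i s r
          exact ⟨j, s', r', by simpa [pvCandB, hs, hr, pvMStep] using h1,
            by simpa [pvStepA, hs, hr] using h2⟩
      · obtain ⟨j, s', r', h1, h2⟩ := ih (a + 1) i s r
        exact ⟨j, s', r', by simpa [pvCandB, hs] using h1, by simpa [pvStepA, hs] using h2⟩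

-- ===== VERDICT (by name: the statement is the Claim_ definition above) =====
theorem winning_index_spec : Claim_equal_winning_index := by
  intro trick _ hpre
  obtain ⟨hlen, hne, hcards⟩ := hpre
  match trick with
  | [] => simp at hlen
  | [t0] => simp at hlen
  | t0 :: hand :: rest =>
    simp only [List.getD, List.getElem?_cons_succ, List.getElem?_cons_zero, Option.getD_some] at hne hcards
    match hhand : hand with
    | [] => exact absurd rfl hne
    | c0 :: cs =>
      have hc0 : c0.length = 2 := hcards c0 (by simp)
      match c0 with
      | [ls, lr] =>
        unfold Spec_winning_index winning_index winning_index_alt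
        have hget : PySem.List.pyGet? (t0 :: ([ls, lr] :: cs) :: rest) 1 = some ([ls, lr] :: cs) := by
          simp [PySem.List.pyGet?, PySem.List.pyIdx?]
        rw [hget]
        simp only [Option.getD_some]
        have hls : ((PySem.List.pyGet? ((PySem.List.pyGet? ([ls, lr] :: cs) 0).getD []) 0)).getD "" = ls := by
          simp [PySem.List.pyGet?, PySem.List.pyIdx?]
        rw [hls]
        simp only [PySem.List.enumerate_cons, List.filterMap_cons]
        have hcand : pvCandB ls ((0 : Int), [ls, lr]) = some ((0 : Int), ls, lr) := by
          simp [pvCandB]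
        rw [hcand, max?_eq_foldl_pvMStep]
        simp only [List.foldl_cons, pvMStep]
        obtain ⟨j, s', r', h1, h2⟩ := main_inv ls cs 0 0 ls lr
        simp only [show (0 : Int) + 1 = 1 by norm_num] at h1
        simp only [h2, show (0 : Int) + 1 = 1 by norm_num, h1]
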